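-- pv_equiv track=rewrite | github.com/algorhythms/LeetCode | 2289 Steps to Make Array Non-decreasing.py | totalSteps_error
-- ===== SOURCE A (Python) =====
-- from typing import List
--
-- def totalSteps_error(A: List[int]) -> int:
--     """
--     use a stack
--     remove A[i] when A[i-1] > A[i]
--     it becomes A[lo] < A[i]
--     Keep a monotonically increasing stack
--     """
--     maxa = 0
--     stk = []  # asc stack
--     cur = 0
--     for a in A:
--         if stk and stk[-1] > a:
--             cur += 1
--             continue
--
--         stk.append(a)
--         maxa = max(maxa, cur)
--         cur = 0
--
--     maxa = max(maxa, cur)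
--     return maxa
-- ===== SOURCE B (Python) =====
-- from typing import List
--
-- def totalSteps_error(A: List[int]) -> int:
--     # Record-index decomposition: collect the positions of running-max records
--     # (i with A[i] >= max of everything before), append a sentinel len(A),
--     # and return the largest gap between consecutive record positions minus 1.
--     n = len(A)
--     if n == 0:
--         return 0
--     rec = []
--     m = None
--     for i, a in enumerate(A):
--         if m is None or a >= m:
--             rec.append(i)
--             m = a
--     rec.append(n)
--     best = 0
--     for r1, r2 in zip(rec, rec[1:]):
--         best = max(best, r2 - r1 - 1)
--     return best
-- ===== Notes on version B (the rewrite author's own statement) =====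
-- stated objective: alternative
-- what changed: Instead of counting runs with a monotonic stack, B collects the index positions of running-max records, appends a sentinel, and returns the largest difference between consecutive record indices minus one (index arithmetic on gaps, no run counter or stack).
import Mathlib
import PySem

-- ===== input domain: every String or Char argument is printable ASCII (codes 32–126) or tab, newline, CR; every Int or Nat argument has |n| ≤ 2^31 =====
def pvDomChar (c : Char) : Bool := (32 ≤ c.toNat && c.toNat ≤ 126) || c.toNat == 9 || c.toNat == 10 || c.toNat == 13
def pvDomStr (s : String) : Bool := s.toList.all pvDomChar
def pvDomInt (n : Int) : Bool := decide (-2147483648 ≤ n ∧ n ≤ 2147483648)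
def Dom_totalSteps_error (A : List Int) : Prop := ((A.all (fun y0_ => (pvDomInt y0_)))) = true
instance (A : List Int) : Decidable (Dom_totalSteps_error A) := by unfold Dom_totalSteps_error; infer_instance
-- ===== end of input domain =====

-- B replaces A's run-counting monotonic stack by record-index collection plus max-gap arithmetic (alternative algorithm, same cost).

-- ===== PORT A =====
def totalSteps_error (A : List Int) : Int :=
  let s := A.foldl
    (fun (st : Int × List Int × Int) (a : Int) =>
      match st.2.1 with
      | t :: _ => if t > a then (st.1, st.2.1, st.2.2 + 1)
                  else (max st.1 st.2.2, a :: st.2.1, 0)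
      | [] => (max st.1 st.2.2, [a], 0))
    (0, ([], 0))
  max s.1 s.2.2

-- ===== PORT B =====
def totalSteps_error_alt (A : List Int) : Int :=
  if A.length = 0 then 0 else
  let st := A.foldl
    (fun (st : List Int × Option Int × Nat) (a : Int) =>
      match st.2.1 with
      | none => (st.1 ++ [(st.2.2 : Int)], some a, st.2.2 + 1)
      | some m => if a ≥ m then (st.1 ++ [(st.2.2 : Int)], some a, st.2.2 + 1)
                  else (st.1, some m, st.2.2 + 1))
    ([], none, 0)
  let recs := st.1 ++ [(A.length : Int)]
  (recs.zip recs.tail).foldl (fun best p => max best (p.2 - p.1 - 1)) 0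

-- ===== PRECONDITION & SPEC =====
def Spec_totalSteps_error (A : List Int) (out : Int) : Prop := out = totalSteps_error_alt A
instance (A : List Int) (out : Int) : Decidable (Spec_totalSteps_error A out) := by unfold Spec_totalSteps_error; infer_instance

-- ===== CLAIM (what is proved, stated in full; the proofs are below) =====
def Claim_equal_totalSteps_error : Prop := ∀ (A : List Int), Dom_totalSteps_error A → Spec_totalSteps_error A (totalSteps_error A)

-- ===== LEMMAS AND PROOFS =====

-- abstract run-counting recursion (A's behaviour): best so far, current run, running max
def pvGo : List Int → Int → Int → Option Int → Int
  | [], best, run, _ => max best run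
  | a :: l, best, run, m =>
    match m with
    | some p => if a < p then pvGo l best (run + 1) (some p)
                else pvGo l (max best run) 0 (some a)
    | none => pvGo l (max best run) 0 (some a)

def pvStepA : Int × List Int × Int → Int → Int × List Int × Int :=
  fun st a =>
    match st.2.1 with
    | t :: _ => if t > a then (st.1, st.2.1, st.2.2 + 1)
                else (max st.1 st.2.2, a :: st.2.1, 0)
    | [] => (max st.1 st.2.2, [a], 0)

lemma pvFoldA_cons (l : List Int) : ∀ (maxa cur t : Int) (rest : List Int),
    (l.foldl pvStepA (maxa, t :: rest, cur)).1 ⊔ (l.foldl pvStepA (maxa, t :: rest, cur)).2.2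
      = pvGo l maxa cur (some t) := by
  induction l with
  | nil => intro maxa cur t rest; simp [pvGo]
  | cons a l ih =>
    intro maxa cur t rest
    by_cases h : t > a
    · simp [List.foldl_cons, pvStepA, pvGo, h, ih]
    · simp [List.foldl_cons, pvStepA, pvGo, h, ih]

lemma pvFoldA_nil (l : List Int) (maxa cur : Int) :
    (l.foldl pvStepA (maxa, ([], cur))).1 ⊔ (l.foldl pvStepA (maxa, ([], cur))).2.2
      = pvGo l maxa cur none := by
  cases l with
  | nil => simp [pvGo]
  | cons a l => simp [List.foldl_cons, pvStepA, pvGo, pvFoldA_cons]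

-- record positions of l, starting at index i with running max m
def pvRecs : Nat → Option Int → List Int → List Int
  | _, _, [] => []
  | i, none, a :: l => (i : Int) :: pvRecs (i + 1) (some a) l
  | i, some p, a :: l =>
      if a ≥ p then (i : Int) :: pvRecs (i + 1) (some a) l
      else pvRecs (i + 1) (some p) l

def pvStepRec : List Int × Option Int × Nat → Int → List Int × Option Int × Nat :=
  fun st a =>
    match st.2.1 with
    | none => (st.1 ++ [(st.2.2 : Int)], some a, st.2.2 + 1)
    | some m => if a ≥ m then (st.1 ++ [(st.2.2 : Int)], some a, st.2.2 + 1)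
                else (st.1, some m, st.2.2 + 1)

lemma pvFoldRec (l : List Int) : ∀ (acc : List Int) (m : Option Int) (i : Nat),
    (l.foldl pvStepRec (acc, m, i)).1 = acc ++ pvRecs i m l := by
  induction l with
  | nil => intro acc m i; simp [pvRecs]
  | cons a l ih =>
    intro acc m i
    cases m with
    | none => simp [List.foldl_cons, pvStepRec, pvRecs, ih]
    | some p =>
      by_cases h : a ≥ p
      · simp [List.foldl_cons, pvStepRec, pvRecs, h, ih]
      · simp [List.foldl_cons, pvStepRec, pvRecs, h, ih]

-- max gap between consecutive positions, given the previous position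
def pvGm : Int → List Int → Int → Int
  | _, [], best => best
  | prev, x :: xs, best => pvGm x xs (max best (x - prev - 1))

lemma pvZipFold (rest : List Int) : ∀ (r best : Int),
    (((r :: rest).zip rest).foldl (fun best p => max best (p.2 - p.1 - 1)) best)
      = pvGm r rest best := by
  induction rest with
  | nil => intro r best; simp [pvGm]
  | cons x xs ih => intro r best; simp [List.zip_cons_cons, List.foldl_cons, pvGm, ih]

-- main bridge: gaps over record positions = run counting
lemma pvMain (l : List Int) : ∀ (i : Nat) (prev p best : Int),
    pvGm prev (pvRecs i (some p) l ++ [((i + l.length : Nat) : Int)]) best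
      = pvGo l best ((i : Int) - prev - 1) (some p) := by
  induction l with
  | nil => intro i prev p best; simp [pvRecs, pvGm, pvGo]
  | cons a l ih =>
    intro i prev p best
    by_cases h : a ≥ p
    · have h' : ¬ a < p := not_lt.mpr h
      have : ((i + 1 + l.length : Nat) : Int) = ((i + (a :: l).length : Nat) : Int) := by
        simp; omega
      simp only [pvRecs, if_pos h, List.cons_append, pvGm, pvGo, h']
      rw [← this, ih (i + 1) (i : Int) a (max best ((i : Int) - prev - 1))]
      norm_num
    · have h' : a < p := not_le.mp h
      have : ((i + 1 + l.length : Nat) : Int) = ((i + (a :: l).length : Nat) : Int) := by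
        simp; omega
      simp only [pvRecs, if_neg h, pvGo, if_pos h']
      rw [← this, ih (i + 1) prev p best]
      have h2 : (((i : Nat) + 1 : Nat) : Int) - prev - 1 = (i : Int) - prev - 1 + 1 := by push_cast; ring
      rw [h2]

lemma pvAEq (A : List Int) : totalSteps_error A = pvGo A 0 0 none := by
  show (A.foldl pvStepA (0, ([], 0))).1 ⊔ (A.foldl pvStepA (0, ([], 0))).2.2 = pvGo A 0 0 none
  exact pvFoldA_nil A 0 0

lemma pvBEq (A : List Int) : totalSteps_error_alt A = pvGo A 0 0 none := by
  cases A with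
  | nil => simp [totalSteps_error_alt, pvGo]
  | cons a l =>
    show (if (a :: l).length = 0 then (0:Int) else _) = _
    rw [if_neg (by simp)]
    show ((((l.foldl pvStepRec ([(0:Int)], some a, 1)).1 ++ [((a :: l).length : Int)]).zip
        ((l.foldl pvStepRec ([(0:Int)], some a, 1)).1 ++ [((a :: l).length : Int)]).tail).foldl
        (fun best p => max best (p.2 - p.1 - 1)) 0) = pvGo (a :: l) 0 0 none
    rw [pvFoldRec l [(0:Int)] (some a) 1]
    have hrec : ([(0:Int)] ++ pvRecs 1 (some a) l) ++ [((a :: l).length : Int)]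
        = (0:Int) :: (pvRecs 1 (some a) l ++ [((1 + l.length : Nat) : Int)]) := by
      simp; omega
    rw [hrec]
    simp only [List.tail_cons]
    rw [pvZipFold (pvRecs 1 (some a) l ++ [((1 + l.length : Nat) : Int)]) 0 0]
    rw [pvMain l 1 0 a 0]
    simp [pvGo]

-- ===== VERDICT (by name: the statement is the Claim_ definition above) =====
theorem totalSteps_error_spec : Claim_equal_totalSteps_error := by
  intro A _
  show totalSteps_error A = totalSteps_error_alt A
  rw [pvAEq, pvBEq]
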